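-- pv_equiv track=rewrite | github.com/doucej/uia-x | uiax/backends/linux/util.py | _parse_keys_to_xdotool
-- ===== SOURCE A (Python) =====
-- def _parse_keys_to_xdotool(keys: str) -> list[str]:
--     """Convert SendKeys notation into xdotool argument tokens.
--
--     xdotool supports chained subcommands in a single invocation, e.g.::
--
--         xdotool key Escape type --clearmodifiers "6*7" key Return
--
--     The key rule: consecutive plain (unmodified) characters must be batched
--     into a *single* ``type --clearmodifiers <text>`` subcommand.  Emitting
--     one ``type`` per character causes xdotool to treat subsequent ``type``
--     tokens as text arguments of the first ``type`` subcommand.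
--     """
--     _XDOTOOL_MAP: dict[str, str] = {
--         "ENTER": "Return", "RETURN": "Return", "TAB": "Tab",
--         "ESC": "Escape", "ESCAPE": "Escape", "BACKSPACE": "BackSpace",
--         "DELETE": "Delete", "INSERT": "Insert", "HOME": "Home",
--         "END": "End", "PGUP": "Prior", "PGDN": "Next",
--         "UP": "Up", "DOWN": "Down", "LEFT": "Left", "RIGHT": "Right",
--         "SPACE": "space",
--         "F1": "F1", "F2": "F2", "F3": "F3", "F4": "F4",
--         "F5": "F5", "F6": "F6", "F7": "F7", "F8": "F8",
--         "F9": "F9", "F10": "F10", "F11": "F11", "F12": "F12",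
--     }
--     _MOD_XDOTOOL: dict[str, str] = {
--         "^": "ctrl", "+": "shift", "%": "alt",
--     }
--
--     result: list[str] = []
--     i = 0
--     length = len(keys)
--     modifiers: list[str] = []
--     # Buffer for consecutive plain characters – flushed as one "type" call
--     plain_buf: list[str] = []
--
--     def _flush_plain() -> None:
--         if plain_buf:
--             result.extend(["type", "--clearmodifiers", "".join(plain_buf)])
--             plain_buf.clear()
--
--     while i < length:
--         ch = keys[i]
--
--         if ch in _MOD_XDOTOOL:
--             _flush_plain()
--             modifiers.append(_MOD_XDOTOOL[ch])
--             i += 1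
--             continue
--
--         if ch == "{":
--             end = keys.find("}", i + 1)
--             if end == -1:
--                 plain_buf.append(ch)
--                 i += 1
--                 continue
--             _flush_plain()
--             key_name = keys[i + 1 : end].upper()
--             xkey = _XDOTOOL_MAP.get(key_name, key_name)
--             combo = "+".join(modifiers + [xkey])
--             result.extend(["key", combo])
--             modifiers.clear()
--             i = end + 1
--             continue
--
--         # Literal character
--         if modifiers:
--             _flush_plain()
--             combo = "+".join(modifiers + [ch])
--             result.extend(["key", combo])
--             modifiers.clear()
--         else:
--             plain_buf.append(ch)
--         i += 1
--
--     _flush_plain()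
--     return result
-- ===== SOURCE B (Python) =====
-- def _parse_keys_to_xdotool(keys: str) -> list[str]:
--     """Convert SendKeys notation into xdotool argument tokens.
--
--     Two-pass formulation: first tokenize the input into a flat stream of
--     (modifier | named-key | literal) tokens, then fold the stream into
--     xdotool subcommands, batching consecutive literals into one ``type``.
--     """
--     _XDOTOOL_MAP = {
--         "ENTER": "Return", "RETURN": "Return", "TAB": "Tab",
--         "ESC": "Escape", "ESCAPE": "Escape", "BACKSPACE": "BackSpace",
--         "DELETE": "Delete", "INSERT": "Insert", "HOME": "Home",
--         "END": "End", "PGUP": "Prior", "PGDN": "Next",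
--         "UP": "Up", "DOWN": "Down", "LEFT": "Left", "RIGHT": "Right",
--         "SPACE": "space",
--         "F1": "F1", "F2": "F2", "F3": "F3", "F4": "F4",
--         "F5": "F5", "F6": "F6", "F7": "F7", "F8": "F8",
--         "F9": "F9", "F10": "F10", "F11": "F11", "F12": "F12",
--     }
--     _MOD_XDOTOOL = {"^": "ctrl", "+": "shift", "%": "alt"}
--
--     # Phase 1: tokenize.
--     tokens = []
--     rest = keys
--     while rest:
--         ch = rest[0]
--         if ch in _MOD_XDOTOOL:
--             tokens.append(("mod", _MOD_XDOTOOL[ch]))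
--             rest = rest[1:]
--         elif ch == "{":
--             body, sep, after = rest[1:].partition("}")
--             if sep:
--                 name = body.upper()
--                 tokens.append(("key", _XDOTOOL_MAP.get(name, name)))
--                 rest = after
--             else:
--                 tokens.append(("raw", ch))  # unmatched '{': always plain-buffered
--                 rest = rest[1:]
--         else:
--             tokens.append(("chr", ch))
--             rest = rest[1:]
--
--     # Phase 2: fold the token stream.
--     result = []
--     modifiers = []
--     plain = []
--
--     def _flush():
--         if plain:
--             result.extend(["type", "--clearmodifiers", "".join(plain)])
--             plain.clear()
--
--     for kind, val in tokens:
--         if kind == "mod":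
--             _flush()
--             modifiers.append(val)
--         elif kind == "key":
--             _flush()
--             result.extend(["key", "+".join(modifiers + [val])])
--             modifiers = []
--         elif kind == "raw":
--             plain.append(val)
--         else:
--             if modifiers:
--                 _flush()
--                 result.extend(["key", "+".join(modifiers + [val])])
--                 modifiers = []
--             else:
--                 plain.append(val)
--     _flush()
--     return result
-- ===== Notes on version B (the rewrite author's own statement) =====
-- stated objective: alternative
-- what changed: Replaced A's single index-driven while loop (manual cursor i plus keys.find for braces) by a two-pass pipeline: a tokenizer that slices the string into modifier/named-key/literal tokens via str.partition, followed by a fold of the token stream into xdotool subcommands.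
import Mathlib
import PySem

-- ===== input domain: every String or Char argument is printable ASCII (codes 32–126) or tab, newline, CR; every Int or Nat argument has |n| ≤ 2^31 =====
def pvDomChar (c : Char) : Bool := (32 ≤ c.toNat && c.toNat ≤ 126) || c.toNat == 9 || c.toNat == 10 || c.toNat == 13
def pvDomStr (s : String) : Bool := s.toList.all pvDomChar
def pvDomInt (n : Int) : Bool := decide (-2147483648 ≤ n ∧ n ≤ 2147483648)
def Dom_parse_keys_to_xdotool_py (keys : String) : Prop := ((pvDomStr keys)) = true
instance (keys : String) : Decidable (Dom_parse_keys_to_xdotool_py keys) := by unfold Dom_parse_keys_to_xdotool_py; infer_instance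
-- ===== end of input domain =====

-- B replaces A's index-driven while loop by a two-pass tokenize-then-fold pipeline (alternative decomposition, same cost).


-- shared constant tables (the same dict literals appear in both Pythons)
def pvXMap : PySem.Dict String String := PySem.Dict.ofList
  [("ENTER","Return"),("RETURN","Return"),("TAB","Tab"),
   ("ESC","Escape"),("ESCAPE","Escape"),("BACKSPACE","BackSpace"),
   ("DELETE","Delete"),("INSERT","Insert"),("HOME","Home"),
   ("END","End"),("PGUP","Prior"),("PGDN","Next"),
   ("UP","Up"),("DOWN","Down"),("LEFT","Left"),("RIGHT","Right"),
   ("SPACE","space"),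
   ("F1","F1"),("F2","F2"),("F3","F3"),("F4","F4"),
   ("F5","F5"),("F6","F6"),("F7","F7"),("F8","F8"),
   ("F9","F9"),("F10","F10"),("F11","F11"),("F12","F12")]

def pvModMap : PySem.Dict Char String := PySem.Dict.ofList [('^',"ctrl"),('+',"shift"),('%',"alt")]

-- _flush_plain, identical in both Pythons ("".join over buffered chars = String.ofList, exact)
def pvFlush (res : List String) (plain : List Char) : List String :=
  if plain = [] then res else res ++ ["type", "--clearmodifiers", String.ofList plain]

-- ===== PORT A =====
-- termination helper for the 'end = keys.find("}", i+1)' jump (cited in decreasing_by)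
theorem pvFindFrom_ge (cs : List Char) (i : Nat) (h : i < cs.length)
    (hne : PySem.Chars.findFrom cs ['}'] ((i : Int) + 1) none ≠ -1) :
    i + 1 ≤ (PySem.Chars.findFrom cs ['}'] ((i : Int) + 1) none).toNat := by
  have hcast : ((i : Int) + 1) = ((i + 1 : Nat) : Int) := by push_cast; ring
  rw [hcast] at hne ⊢
  have := (PySem.Chars.findFrom_natCast_spec cs ['}'] (i+1) (by omega) hne).1
  omega

-- the while loop of A: state (i, modifiers, plain_buf, result)
def pvGoA (cs : List Char) (i : Nat) (mods : List String) (plain : List Char)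
    (res : List String) : List String :=
  if h : i < cs.length then
    let ch := cs[i]
    match pvModMap.get? ch with
    | some m => pvGoA cs (i+1) (mods ++ [m]) [] (pvFlush res plain)
    | none =>
      if ch = '{' then
        let e := PySem.Chars.findFrom cs ['}'] ((i : Int) + 1) none
        if he : e = -1 then pvGoA cs (i+1) mods (plain ++ ['{']) res
        else
          let name := PySem.Chars.upper (PySem.Chars.slice cs (some ((i : Int)+1)) (some e))
          let xkey := pvXMap.getD (String.ofList name) (String.ofList name)
          pvGoA cs (e.toNat + 1) [] []
            (pvFlush res plain ++ ["key", PySem.Str.join "+" (mods ++ [xkey])])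
      else
        if mods ≠ [] then
          pvGoA cs (i+1) [] []
            (pvFlush res plain ++ ["key", PySem.Str.join "+" (mods ++ [String.ofList [ch]])])
        else pvGoA cs (i+1) mods (plain ++ [ch]) res
  else pvFlush res plain
termination_by cs.length - i
decreasing_by
  all_goals first
    | omega
    | (have := pvFindFrom_ge cs i h he; omega)

def parse_keys_to_xdotool_py (keys : String) : List String :=
  pvGoA keys.toList 0 [] [] []

-- ===== PORT B =====
inductive PvTok where
  | mod : String → PvTok
  | key : String → PvTok
  | raw : Char → PvTok      -- unmatched '{': always plain-buffered
  | chr : Char → PvTok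
deriving DecidableEq, Repr

-- phase 1: the tokenizer ('body, sep, after = rest[1:].partition("}")' is exact via takeWhile/dropWhile for the one-char separator)
def pvTokenize : List Char → List PvTok
  | [] => []
  | c :: rest =>
    match pvModMap.get? c with
    | some m => .mod m :: pvTokenize rest
    | none =>
      if c = '{' then
        match hafter : rest.dropWhile (· ≠ '}') with
        | [] => .raw '{' :: pvTokenize rest
        | _ :: tl =>
          let name := PySem.Chars.upper (rest.takeWhile (· ≠ '}'))
          .key (pvXMap.getD (String.ofList name) (String.ofList name)) :: pvTokenize tl
      else .chr c :: pvTokenize rest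
termination_by l => l.length
decreasing_by
  all_goals simp only [List.length_cons]
  all_goals try omega
  all_goals
    (have h1 : (rest.dropWhile (· ≠ '}')).length ≤ rest.length := List.length_dropWhile_le _ _
     rw [hafter] at h1; simp only [List.length_cons] at h1; omega)

-- phase 2: one fold step of the 'for kind, val in tokens' loop
def pvStep : (List String × List String × List Char) → PvTok → (List String × List String × List Char)
  | (res, mods, plain), .mod m => (pvFlush res plain, mods ++ [m], [])
  | (res, mods, plain), .key k =>
      (pvFlush res plain ++ ["key", PySem.Str.join "+" (mods ++ [k])], [], [])
  | (res, mods, plain), .raw c => (res, mods, plain ++ [c])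
  | (res, mods, plain), .chr c =>
      if mods ≠ [] then
        (pvFlush res plain ++ ["key", PySem.Str.join "+" (mods ++ [String.ofList [c]])], [], [])
      else (res, mods, plain ++ [c])

def parse_keys_to_xdotool_py_alt (keys : String) : List String :=
  let st := (pvTokenize keys.toList).foldl pvStep ([], [], [])
  pvFlush st.1 st.2.2

-- ===== PRECONDITION & SPEC =====
def Spec_parse_keys_to_xdotool_py (keys : String) (out : List String) : Prop := out = parse_keys_to_xdotool_py_alt keys
instance (keys : String) (out : List String) : Decidable (Spec_parse_keys_to_xdotool_py keys out) := by unfold Spec_parse_keys_to_xdotool_py; infer_instance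

-- ===== CLAIM (what is proved, stated in full; the proofs are below) =====
def Claim_equal_parse_keys_to_xdotool_py : Prop := ∀ (keys : String), Dom_parse_keys_to_xdotool_py keys → Spec_parse_keys_to_xdotool_py keys (parse_keys_to_xdotool_py keys)

-- ===== LEMMAS AND PROOFS =====

-- single-character find: the length of the takeWhile prefix when the char occurs
theorem pvFind_single_pos (t : List Char) (c : Char) (hc : c ∈ t) :
    PySem.Chars.find t [c] = ((t.takeWhile (· ≠ c)).length : Int) := by
  have hnn : 0 ≤ PySem.Chars.find t [c] := by
    rw [PySem.Chars.find_nonneg_iff]; exact (List.singleton_infix_iff c t).mpr hc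
  obtain ⟨hpre, hmin⟩ := PySem.Chars.find_spec (s := t) (sub := [c]) hnn
  set j := (t.takeWhile (· ≠ c)).length with hj
  have hsplit : t.takeWhile (· ≠ c) ++ t.dropWhile (· ≠ c) = t := List.takeWhile_append_dropWhile
  have hdw : t.dropWhile (· ≠ c) ≠ [] := by
    intro hnil
    have := (List.dropWhile_eq_nil_iff.mp hnil) c hc
    simp at this
  have hdrop : t.drop j = t.dropWhile (· ≠ c) := by
    conv_lhs => rw [← hsplit]
    rw [List.drop_append_of_le_length (by omega), List.drop_length, List.nil_append]
  obtain ⟨d, tl', hdt'⟩ := List.exists_cons_of_ne_nil hdw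
  have hdc : d = c := by
    have h2 := List.head_dropWhile_not (p := (· ≠ c)) (l := t) hdw
    simp only [hdt', List.head_cons] at h2
    simpa using h2
  have hprej : [c] <+: t.drop j := by
    rw [hdrop, hdt', hdc]
    exact ⟨tl', rfl⟩
  have hlen : j ≤ t.length := (List.takeWhile_prefix _).length_le
  have hminj : ∀ i < j, ¬ ([c] <+: t.drop i) := by
    intro i hi hp
    have hi' : i < t.length := by omega
    have hcons : t.drop i = t[i] :: t.drop (i+1) := List.drop_eq_getElem_cons hi'
    rw [hcons] at hp
    obtain ⟨u, hu⟩ := hp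
    have hti : t[i] = c := by injection hu with h1 _; exact h1.symm
    obtain ⟨v, hv⟩ := List.takeWhile_prefix (l := t) (p := (· ≠ c))
    have h5 : t[i] = (t.takeWhile (· ≠ c) ++ v)[i]'(by rw [hv]; exact hi') :=
      List.getElem_of_eq hv.symm _
    have h6 : (t.takeWhile (· ≠ c) ++ v)[i]'(by rw [hv]; exact hi') =
        (t.takeWhile (· ≠ c))[i]'(by omega) := List.getElem_append_left (by omega)
    have hmem' : t[i] ∈ t.takeWhile (· ≠ c) := by
      rw [h5, h6]; exact List.getElem_mem _
    have := List.mem_takeWhile_imp hmem'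
    simp [hti] at this
  have h1 : (PySem.Chars.find t [c]).toNat = j := by
    by_contra hne
    rcases Nat.lt_or_ge (PySem.Chars.find t [c]).toNat j with hlt | hge
    · exact hminj _ hlt hpre
    · have hgt : j < (PySem.Chars.find t [c]).toNat := by omega
      exact hmin j hgt hprej
  omega

theorem pvDrop_succ (t : List Char) (j : Nat) : t.drop (j+1) = (t.drop j).tail := by
  rw [← List.drop_drop]; simp

-- tokenizer unfolding equations (the dependent match needs explicit case lemmas)
theorem pvTokenize_cons_mod (c : Char) (rest : List Char) (m : String)
    (hm : pvModMap.get? c = some m) :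
    pvTokenize (c :: rest) = .mod m :: pvTokenize rest := by
  simp only [pvTokenize, hm]

theorem pvTokenize_cons_chr (c : Char) (rest : List Char)
    (hm : pvModMap.get? c = none) (hc : ¬ c = '{') :
    pvTokenize (c :: rest) = .chr c :: pvTokenize rest := by
  simp only [pvTokenize, hm, if_neg hc]

theorem pvTokenize_cons_raw (c : Char) (rest : List Char)
    (hm : pvModMap.get? c = none) (hc : c = '{')
    (hd : rest.dropWhile (· ≠ '}') = []) :
    pvTokenize (c :: rest) = .raw '{' :: pvTokenize rest := by
  subst hc
  simp only [pvTokenize, hm]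
  split
  · split
    · rfl
    · rename_i heq
      rw [hd] at heq
      exact absurd heq (by simp)
  · simp_all

theorem pvTokenize_cons_key (c : Char) (rest : List Char) (d : Char) (tl : List Char)
    (hm : pvModMap.get? c = none) (hc : c = '{')
    (hd : rest.dropWhile (· ≠ '}') = d :: tl) :
    pvTokenize (c :: rest) =
      .key (pvXMap.getD (String.ofList (PySem.Chars.upper (rest.takeWhile (· ≠ '}'))))
              (String.ofList (PySem.Chars.upper (rest.takeWhile (· ≠ '}'))))) :: pvTokenize tl := by
  subst hc
  simp only [pvTokenize, hm]
  split
  · split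
    · rename_i heq
      rw [hd] at heq
      exact absurd heq.symm (by simp)
    · rename_i heq
      have h2 := hd.symm.trans heq
      injection h2 with h3 h4
      rw [← h4]
  · simp_all

-- main loop correspondence: A's cursor loop from i equals B's fold over the tokens of the suffix
theorem pvGoA_eq (cs : List Char) (i : Nat) (mods : List String) (plain : List Char)
    (res : List String) (hi : i ≤ cs.length) :
    pvGoA cs i mods plain res =
      (let st := (pvTokenize (cs.drop i)).foldl pvStep (res, mods, plain)
       pvFlush st.1 st.2.2) := by
  by_cases h : i < cs.length
  · have hdropi : cs.drop i = cs[i] :: cs.drop (i+1) := List.drop_eq_getElem_cons h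
    rw [pvGoA, dif_pos h, hdropi]
    cases hm : pvModMap.get? cs[i] with
    | some m =>
        simp only [hm]
        rw [pvTokenize_cons_mod _ _ _ hm]
        rw [pvGoA_eq cs (i+1) (mods ++ [m]) [] (pvFlush res plain) (by omega)]
        rw [List.foldl_cons]; rfl
    | none =>
        simp only [hm]
        by_cases hbr : cs[i] = '{'
        · simp only [if_pos hbr]
          set t := cs.drop (i+1) with ht
          have hcast : ((i : Int) + 1) = ((i + 1 : Nat) : Int) := by push_cast; ring
          have hff : PySem.Chars.findFrom cs ['}'] ((i : Int) + 1) none =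
              (if PySem.Chars.find t ['}'] = -1 then -1
               else ((i+1 : Nat) : Int) + PySem.Chars.find t ['}']) := by
            rw [hcast, PySem.Chars.findFrom_natCast cs ['}'] (i+1) (by omega)]
          by_cases hmem : '}' ∈ t
          · -- matched brace: A jumps to end+1, B consumes through the tail of dropWhile
            have hfind := pvFind_single_pos t '}' hmem
            set j := (t.takeWhile (· ≠ '}')).length with hj
            have hsplit : t.takeWhile (· ≠ '}') ++ t.dropWhile (· ≠ '}') = t :=
              List.takeWhile_append_dropWhile
            have hdw : t.dropWhile (· ≠ '}') ≠ [] := by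
              intro hnil
              have := (List.dropWhile_eq_nil_iff.mp hnil) '}' hmem
              simp at this
            obtain ⟨d, tl, hdt⟩ := List.exists_cons_of_ne_nil hdw
            have hlent : t.length = cs.length - (i+1) := by rw [ht, List.length_drop]
            have hjlt : j < t.length := by
              have := congrArg List.length hsplit
              rw [hdt] at this
              simp only [List.length_append, List.length_cons] at this
              omega
            have he : PySem.Chars.findFrom cs ['}'] ((i : Int) + 1) none = ((i+1+j : Nat) : Int) := by
              rw [hff, if_neg (by rw [hfind]; omega), hfind]; push_cast; ring
            have hdropj : t.drop j = t.dropWhile (· ≠ '}') := by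
              conv_lhs => rw [← hsplit]
              rw [List.drop_append_of_le_length (by omega), List.drop_length, List.nil_append]
            have htl : cs.drop (i+1+j+1) = tl := by
              rw [show i+1+j+1 = (i+1)+(j+1) from by omega, ← List.drop_drop]
              rw [← ht, pvDrop_succ, hdropj, hdt, List.tail_cons]
            have hslice : PySem.Chars.slice cs (some ((i : Int)+1)) (some ((i+1+j : Nat) : Int)) =
                t.takeWhile (· ≠ '}') := by
              rw [hcast]
              rw [PySem.Chars.slice_eq_listSlice, PySem.List.slice_natCast]
              have : (i+1+j) - (i+1) = j := by omega
              rw [this, ← ht]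
              conv_lhs => rw [← hsplit]
              rw [List.take_append_of_le_length (by omega), List.take_of_length_le (by omega)]
            rw [pvTokenize_cons_key _ _ d tl hm hbr hdt]
            rw [dif_neg (show ¬ PySem.Chars.findFrom cs ['}'] ((i : Int) + 1) none = -1 by
              rw [he]; omega)]
            rw [he]
            simp only [Int.toNat_natCast]
            rw [hslice]
            rw [pvGoA_eq cs (i+1+j+1) [] [] _ (by omega), htl]
            rw [List.foldl_cons]; rfl
          · -- unmatched brace: find = -1, dropWhile = []
            have hfindneg : PySem.Chars.find t ['}'] = -1 := by
              rw [PySem.Chars.find_eq_neg_one_iff]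
              intro hinf
              exact hmem (hinf.subset (by simp))
            have he : PySem.Chars.findFrom cs ['}'] ((i : Int) + 1) none = -1 := by
              rw [hff, if_pos hfindneg]
            have hdwnil : t.dropWhile (· ≠ '}') = [] := by
              rw [List.dropWhile_eq_nil_iff]
              intro x hx
              simp only [ne_eq, decide_eq_true_eq]
              intro hxe; exact hmem (hxe ▸ hx)
            rw [pvTokenize_cons_raw _ _ hm hbr hdwnil]
            rw [dif_pos he]
            rw [pvGoA_eq cs (i+1) mods (plain ++ ['{']) res (by omega)]
            rw [← ht, List.foldl_cons]; rfl
        · simp only [if_neg hbr]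
          rw [pvTokenize_cons_chr _ _ hm hbr]
          cases mods with
          | nil =>
              rw [if_neg (by simp)]
              rw [pvGoA_eq cs (i+1) [] (plain ++ [cs[i]]) res (by omega)]
              rw [List.foldl_cons]; rfl
          | cons a as =>
              rw [if_pos (by simp)]
              rw [pvGoA_eq cs (i+1) [] [] _ (by omega)]
              rw [List.foldl_cons]; rfl
  · have hie : i = cs.length := by omega
    rw [pvGoA, dif_neg h, hie, List.drop_length]
    simp only [pvTokenize, List.foldl_nil]
termination_by cs.length - i
decreasing_by all_goals omega

-- ===== VERDICT (by name: the statement is the Claim_ definition above) =====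
theorem parse_keys_to_xdotool_py_spec : Claim_equal_parse_keys_to_xdotool_py := by
  intro keys _
  unfold Spec_parse_keys_to_xdotool_py parse_keys_to_xdotool_py parse_keys_to_xdotool_py_alt
  exact pvGoA_eq keys.toList 0 [] [] [] (by omega)
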